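-- pv_equiv track=rewrite | github.com/omniavis-ict/codice_appalti | codiceapp/extract_articles.py | extract_articles
-- ===== SOURCE A (Python) =====
-- def extract_articles(lines):
--     elenco = []
--
--     libri = 0
--     capitoli = 0
--     testo_articoli = []
--     articolo = []
--
--     for enumed_line, line in enumerate(lines):
--         if "LIBRO" in line:
--             libro = line.replace("\n", "")
--             libri += 1
--             capitoli = 0
--         if "Articolo" in line:
--             capitoli += 1
--             nArticolo = line.replace("\n", "").replace(".", "").strip()
--             titoloArticolo = lines[enumed_line + 1].replace("\n", "").strip()
--             elenco.append([libro, nArticolo, titoloArticolo, f"{libri:02}.{capitoli:02}.", f"{libri:02}.{capitoli:02}. {nArticolo.strip()} - {titoloArticolo.strip()}" ])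
--             testo_articoli.append(articolo)
--             articolo = []
--         articolo.append(line.replace("\n", " ").strip())
--     return elenco, testo_articoli
-- ===== SOURCE B (Python) =====
-- def extract_articles(lines):
--     arts = [i for i, l in enumerate(lines) if "Articolo" in l]
--     libs = [i for i, l in enumerate(lines) if "LIBRO" in l]
--     proc = [l.replace("\n", " ").strip() for l in lines]
--
--     testo_articoli = []
--     prev = 0
--     for i in arts:
--         testo_articoli.append(proc[prev:i])
--         prev = i
--
--     elenco = []
--     for i in arts:
--         before = [j for j in libs if j <= i]
--         libri = len(before)
--         last_lib = before[-1]
--         capitoli = len([k for k in arts if last_lib <= k <= i])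
--         libro = lines[last_lib].replace("\n", "")
--         nArticolo = lines[i].replace("\n", "").replace(".", "").strip()
--         titolo = lines[i + 1].replace("\n", "").strip()
--         code = f"{libri:02}.{capitoli:02}."
--         elenco.append([libro, nArticolo, titolo, code, f"{code} {nArticolo} - {titolo}"])
--     return elenco, testo_articoli
-- ===== Notes on version B (the rewrite author's own statement) =====
-- stated objective: alternative
-- what changed: A is one stateful pass over enumerate(lines) threading six mutable variables; B first collects the article/LIBRO index lists, builds the text groups by slicing between consecutive article indices, and computes each elenco row independently from counts and the last preceding LIBRO index.
import Mathlib
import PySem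

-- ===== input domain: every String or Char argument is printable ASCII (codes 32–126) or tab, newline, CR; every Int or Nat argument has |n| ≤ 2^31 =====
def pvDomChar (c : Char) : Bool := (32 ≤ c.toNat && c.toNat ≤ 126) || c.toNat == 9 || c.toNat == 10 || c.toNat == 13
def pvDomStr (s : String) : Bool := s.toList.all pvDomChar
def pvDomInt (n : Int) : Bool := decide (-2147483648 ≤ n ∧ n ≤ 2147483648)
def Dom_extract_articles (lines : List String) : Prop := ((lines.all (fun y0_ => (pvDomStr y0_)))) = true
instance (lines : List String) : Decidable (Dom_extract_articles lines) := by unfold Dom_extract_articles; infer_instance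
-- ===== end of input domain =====

-- B replaces A's single six-variable stateful pass by an index-list decomposition (article/LIBRO
-- positions, slicing between consecutive articles, per-article counting); objective: alternative
-- decomposition, same results.

-- Python's f"{n:02}" for the nonnegative counters both programs format
def pvFmt2 (n : Int) : String := if n < 10 then "0" ++ PySem.Int.toStr n else PySem.Int.toStr n

-- ===== PORT A =====
-- the loop body of A: state (elenco, libri, capitoli, testo_articoli, articolo, libro?)
-- (Python's not-yet-assigned 'libro' is the 'none' of the Option; Pre_ keeps it unread while none)
def pvStepA (lines : List String)
    (st : List (List String) × Int × Int × List (List String) × List String × Option String)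
    (q : Int × String) :
    List (List String) × Int × Int × List (List String) × List String × Option String :=
  match st, q with
  | (elenco, libri, capitoli, testo, articolo, libro?), (i, line) =>
    let libro? := if PySem.Str.isIn "LIBRO" line then some (PySem.Str.replace line "\n" "") else libro?
    let libri := if PySem.Str.isIn "LIBRO" line then libri + 1 else libri
    let capitoli := if PySem.Str.isIn "LIBRO" line then 0 else capitoli
    if PySem.Str.isIn "Articolo" line then
      let capitoli := capitoli + 1
      let nArticolo := PySem.Str.strip (PySem.Str.replace (PySem.Str.replace line "\n" "") "." "")
      let titoloArticolo := PySem.Str.strip (PySem.Str.replace ((PySem.List.pyGet? lines (i + 1)).getD "") "\n" "")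
      let row := [libro?.getD "", nArticolo, titoloArticolo,
                  pvFmt2 libri ++ "." ++ pvFmt2 capitoli ++ ".",
                  pvFmt2 libri ++ "." ++ pvFmt2 capitoli ++ ". " ++ PySem.Str.strip nArticolo ++ " - " ++ PySem.Str.strip titoloArticolo]
      (elenco ++ [row], libri, capitoli, testo ++ [articolo],
       [PySem.Str.strip (PySem.Str.replace line "\n" " ")], libro?)
    else
      (elenco, libri, capitoli, testo,
       articolo ++ [PySem.Str.strip (PySem.Str.replace line "\n" " ")], libro?)

def extract_articles (lines : List String) : List (List String) × List (List String) :=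
  let st := (PySem.List.enumerate lines).foldl (pvStepA lines) ([], 0, 0, [], [], none)
  (st.1, st.2.2.2.1)

-- ===== PORT B =====
def pvIsArt (l : String) : Bool := PySem.Str.isIn "Articolo" l
def pvIsLib (l : String) : Bool := PySem.Str.isIn "LIBRO" l
def pvRepl (l : String) : String := PySem.Str.replace l "\n" ""
def pvProc (l : String) : String := PySem.Str.strip (PySem.Str.replace l "\n" " ")

-- [i for i, l in enumerate(xs) if p(l)]
def pvIdxs (p : String → Bool) (xs : List String) (s : Int) : List Int :=
  ((PySem.List.enumerate xs s).filter (fun q => p q.2)).map Prod.fst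

-- one elenco row, computed independently from the index lists
def pvRow (lines : List String) (arts libs : List Int) (i : Int) : List String :=
  let before := libs.filter (fun j => decide (j ≤ i))
  let libri : Int := before.length
  let lastLib := (PySem.List.pyGet? before (-1)).getD 0
  let capitoli : Int := (arts.filter (fun k => decide (lastLib ≤ k) && decide (k ≤ i))).length
  let libro := pvRepl ((PySem.List.pyGet? lines lastLib).getD "")
  let nArticolo := PySem.Str.strip (PySem.Str.replace (pvRepl ((PySem.List.pyGet? lines i).getD "")) "." "")
  let titolo := PySem.Str.strip (pvRepl ((PySem.List.pyGet? lines (i + 1)).getD ""))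
  let code := pvFmt2 libri ++ "." ++ pvFmt2 capitoli ++ "."
  [libro, nArticolo, titolo, code, code ++ " " ++ nArticolo ++ " - " ++ titolo]

-- the testo_articoli loop: append proc[prev:i], remember prev := i
def pvSegStep (proc : List String) (acc : List (List String) × Int) (i : Int) :
    List (List String) × Int :=
  (acc.1 ++ [PySem.List.slice proc (some acc.2) (some i)], i)

def extract_articles_alt (lines : List String) : List (List String) × List (List String) :=
  let arts := pvIdxs pvIsArt lines 0
  let libs := pvIdxs pvIsLib lines 0
  let proc := lines.map pvProc
  (arts.map (pvRow lines arts libs), (arts.foldl (pvSegStep proc) ([], 0)).1)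

-- ===== PRECONDITION & SPEC =====
-- Pre_ excludes exactly the inputs on which A raises: an "Articolo" line that is the last line
-- (IndexError on lines[i+1]) or has no "LIBRO" line at or before it (NameError on 'libro').
def Pre_extract_articles (lines : List String) : Prop :=
  ∀ q ∈ PySem.List.enumerate lines 0, PySem.Str.isIn "Articolo" q.2 = true →
    q.1 + 1 < (lines.length : Int) ∧
    ∃ r ∈ PySem.List.enumerate lines 0, r.1 ≤ q.1 ∧ PySem.Str.isIn "LIBRO" r.2 = true
instance (lines : List String) : Decidable (Pre_extract_articles lines) := by
  unfold Pre_extract_articles; infer_instance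

def pvWitness_extract_articles : List String := ["LIBRO I", "Articolo 1.", "Titolo", "testo"]

def Spec_extract_articles (lines : List String) (out : List (List String) × List (List String)) : Prop :=
  out = extract_articles_alt lines
instance (lines : List String) (out : List (List String) × List (List String)) :
    Decidable (Spec_extract_articles lines out) := by unfold Spec_extract_articles; infer_instance

-- ===== CLAIM (what is proved, stated in full; the proofs are below) =====
def Claim_equal_extract_articles : Prop :=
  ∀ (lines : List String), Dom_extract_articles lines → Pre_extract_articles lines →
    Spec_extract_articles lines (extract_articles lines)

-- ===== LEMMAS AND PROOFS =====

-- the closed-form state of A's loop after the prefix 'pre' of 'lines' has been processed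
def pvPhi (lines pre : List String) :
    List (List String) × Int × Int × List (List String) × List String × Option String :=
  let arts := pvIdxs pvIsArt lines 0
  let libs := pvIdxs pvIsLib lines 0
  let artsP := pvIdxs pvIsArt pre 0
  let libsP := pvIdxs pvIsLib pre 0
  let proc := lines.map pvProc
  (artsP.map (pvRow lines arts libs),
   (libsP.length : Int),
   ((artsP.filter (fun k => decide ((libsP.getLast?.getD 0) ≤ k))).length : Int),
   (artsP.foldl (pvSegStep proc) ([], 0)).1,
   PySem.List.slice proc (some (artsP.getLast?.getD 0)) (some (pre.length : Int)),
   libsP.getLast?.map (fun j => pvRepl ((PySem.List.pyGet? lines j).getD "")))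

theorem pvIdxs_append_singleton (p : String → Bool) (pre : List String) (l : String) :
    pvIdxs p (pre ++ [l]) 0 = pvIdxs p pre 0 ++ (if p l then [(pre.length : Int)] else []) := by
  by_cases hp : p l <;>
    simp [pvIdxs, PySem.List.enumerate_append, List.filter_append, hp]

theorem pvIdxs_mem_bounds (p : String → Bool) (xs : List String) (s j : Int)
    (h : j ∈ pvIdxs p xs s) : s ≤ j ∧ j < s + xs.length := by
  simp [pvIdxs] at h
  obtain ⟨a, ha, hp⟩ := h
  rw [PySem.List.mem_enumerate_iff] at ha
  obtain ⟨k, hk, he⟩ := ha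
  rw [Prod.ext_iff] at he
  obtain ⟨h1, -⟩ := he
  constructor <;> (simp at h1; omega)

theorem pvIdxs_split (p : String → Bool) (pre rest : List String) :
    pvIdxs p (pre ++ rest) 0 = pvIdxs p pre 0 ++ pvIdxs p rest (pre.length : Int) := by
  simp [pvIdxs, PySem.List.enumerate_append]

theorem pvSeg_snd (proc : List String) (l : List Int) : ∀ (acc : List (List String)) (prev : Int),
    (l.foldl (pvSegStep proc) (acc, prev)).2 = l.getLast?.getD prev := by
  induction l with
  | nil => simp
  | cons a t ih => intro acc prev; simp [pvSegStep, ih, List.getLast?_cons]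

theorem pvLstrip_rstrip (t : List Char) (h : List.dropWhile PySem.Chars.isspace t = t) :
    List.dropWhile PySem.Chars.isspace (PySem.Chars.rstrip t) = PySem.Chars.rstrip t := by
  cases t with
  | nil => simp [PySem.Chars.rstrip]
  | cons c t' =>
    have hc : PySem.Chars.isspace c = false := by
      by_contra hb
      have hb' : PySem.Chars.isspace c = true := by simpa using hb
      rw [List.dropWhile_cons_of_pos hb'] at h
      have := congrArg List.length h
      have h2 := List.length_dropWhile_le (p := PySem.Chars.isspace) (l := t')
      simp at this; omega
    unfold PySem.Chars.rstrip
    rw [List.reverse_cons, List.dropWhile_append]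
    split
    · simp [hc]
    · simp [List.dropWhile_cons_of_neg, hc]

theorem pvStrip_idem_chars (s : List Char) :
    PySem.Chars.strip (PySem.Chars.strip s) = PySem.Chars.strip s := by
  unfold PySem.Chars.strip PySem.Chars.lstrip
  rw [pvLstrip_rstrip _ (List.dropWhile_idempotent _ _)]
  unfold PySem.Chars.rstrip
  simp [List.dropWhile_idempotent]

theorem pvStrip_idem (s : String) : PySem.Str.strip (PySem.Str.strip s) = PySem.Str.strip s := by
  unfold PySem.Str.strip
  rw [String.toList_ofList, pvStrip_idem_chars]

theorem pvGet_neg_one {α : Type} (xs : List α) :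
    PySem.List.pyGet? xs (-1) = xs.getLast? := by
  simp only [PySem.List.pyGet?, PySem.List.pyIdx?]
  rcases xs.eq_nil_or_concat with rfl | ⟨ys, y, rfl⟩
  · simp
  · simp

theorem pvSlice_extend {α : Type} (proc : List α) (a : Int) (t : Nat) (h0 : 0 ≤ a)
    (hat : a ≤ (t : Int)) (ht : t < proc.length) :
    PySem.List.slice proc (some a) (some ((t : Int) + 1))
      = PySem.List.slice proc (some a) (some (t : Int)) ++ [proc[t]] := by
  rw [PySem.List.slice_toNat (b := (t : Int) + 1) proc h0 (by omega),
      PySem.List.slice_toNat (b := (t : Int)) proc h0 (by omega)]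
  have h1 : ((t : Int) + 1).toNat = t + 1 := by omega
  have h2 : ((t : Int)).toNat = t := by omega
  rw [h1, h2]
  have h3 : t + 1 - a.toNat = (t - a.toNat) + 1 := by omega
  rw [h3, List.take_add_one]
  congr 1
  rw [List.getElem?_drop]
  have h4 : a.toNat + (t - a.toNat) = t := by omega
  rw [h4, List.getElem?_eq_getElem ht]
  rfl

theorem pvSlice_empty {α : Type} (proc : List α) (t : Int) (h0 : 0 ≤ t) :
    PySem.List.slice proc (some t) (some t) = [] := by
  rw [PySem.List.slice_toNat (b := t) proc h0 h0]; simp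

theorem pvLastD_bounds (l : List Int) (t : Int) (h0 : 0 ≤ t)
    (hb : ∀ j ∈ l, 0 ≤ j ∧ j < t) : 0 ≤ l.getLast?.getD 0 ∧ l.getLast?.getD 0 ≤ t := by
  cases hl : l.getLast? with
  | none => simpa using h0
  | some j =>
    have := hb j (List.mem_of_getLast? hl)
    simp only [Option.getD_some]
    omega

theorem pvStep_phi (lines pre rest : List String) (line : String)
    (hl : lines = pre ++ line :: rest) (hp : Pre_extract_articles lines) :
    pvStepA lines (pvPhi lines pre) ((pre.length : Int), line) = pvPhi lines (pre ++ [line]) := by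
  have hgt : PySem.List.pyGet? lines (pre.length : Int) = some line := by
    rw [PySem.List.pyGet?_natCast, hl]
    simp
  have hlenL : pre.length < lines.length := by rw [hl]; simp
  have hAeq := pvIdxs_append_singleton pvIsArt pre line
  have hLeq := pvIdxs_append_singleton pvIsLib pre line
  have hmemA : ∀ j ∈ pvIdxs pvIsArt pre 0, 0 ≤ j ∧ j < (pre.length : Int) := by
    intro j hj; have := pvIdxs_mem_bounds pvIsArt pre 0 j hj; omega
  have hmemL : ∀ j ∈ pvIdxs pvIsLib pre 0, 0 ≤ j ∧ j < (pre.length : Int) := by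
    intro j hj; have := pvIdxs_mem_bounds pvIsLib pre 0 j hj; omega
  have hl2 : lines = (pre ++ [line]) ++ rest := by simp [hl]
  have hsplitA : pvIdxs pvIsArt lines 0
      = pvIdxs pvIsArt (pre ++ [line]) 0 ++ pvIdxs pvIsArt rest ((pre.length : Int) + 1) := by
    have harg : (((pre ++ [line]).length : Nat) : Int) = (pre.length : Int) + 1 := by simp
    rw [hl2, pvIdxs_split, harg]
  have hsplitL : pvIdxs pvIsLib lines 0
      = pvIdxs pvIsLib (pre ++ [line]) 0 ++ pvIdxs pvIsLib rest ((pre.length : Int) + 1) := by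
    have harg : (((pre ++ [line]).length : Nat) : Int) = (pre.length : Int) + 1 := by simp
    rw [hl2, pvIdxs_split, harg]
  have hmemA' : ∀ j ∈ pvIdxs pvIsArt (pre ++ [line]) 0, 0 ≤ j ∧ j ≤ (pre.length : Int) := by
    intro j hj; have := pvIdxs_mem_bounds pvIsArt (pre ++ [line]) 0 j hj; simp at this; omega
  have hmemL' : ∀ j ∈ pvIdxs pvIsLib (pre ++ [line]) 0, 0 ≤ j ∧ j ≤ (pre.length : Int) := by
    intro j hj; have := pvIdxs_mem_bounds pvIsLib (pre ++ [line]) 0 j hj; simp at this; omega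
  have hmemAr : ∀ j ∈ pvIdxs pvIsArt rest ((pre.length : Int) + 1), (pre.length : Int) < j := by
    intro j hj; have := pvIdxs_mem_bounds pvIsArt rest ((pre.length : Int) + 1) j hj; omega
  have hmemLr : ∀ j ∈ pvIdxs pvIsLib rest ((pre.length : Int) + 1), (pre.length : Int) < j := by
    intro j hj; have := pvIdxs_mem_bounds pvIsLib rest ((pre.length : Int) + 1) j hj; omega
  have hbefore : (pvIdxs pvIsLib lines 0).filter (fun j => decide (j ≤ (pre.length : Int)))
      = pvIdxs pvIsLib (pre ++ [line]) 0 := by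
    have h1 : (pvIdxs pvIsLib (pre ++ [line]) 0).filter (fun j => decide (j ≤ (pre.length : Int)))
        = pvIdxs pvIsLib (pre ++ [line]) 0 :=
      List.filter_eq_self.2 (by intro j hj; simpa using (hmemL' j hj).2)
    have h2 : (pvIdxs pvIsLib rest ((pre.length : Int) + 1)).filter
          (fun j => decide (j ≤ (pre.length : Int))) = [] :=
      List.filter_eq_nil_iff.2 (by intro j hj; simpa using not_le.2 (hmemLr j hj))
    rw [hsplitL, List.filter_append, h1, h2, List.append_nil]
  have hcapfull : ∀ m : Int,
      (pvIdxs pvIsArt lines 0).filter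
          (fun k => decide (m ≤ k) && decide (k ≤ (pre.length : Int)))
        = (pvIdxs pvIsArt (pre ++ [line]) 0).filter (fun k => decide (m ≤ k)) := by
    intro m
    have h1 : (pvIdxs pvIsArt (pre ++ [line]) 0).filter
          (fun k => decide (m ≤ k) && decide (k ≤ (pre.length : Int)))
        = (pvIdxs pvIsArt (pre ++ [line]) 0).filter (fun k => decide (m ≤ k)) :=
      List.filter_congr (by intro j hj; simp [(hmemA' j hj).2])
    have h2 : (pvIdxs pvIsArt rest ((pre.length : Int) + 1)).filter
          (fun k => decide (m ≤ k) && decide (k ≤ (pre.length : Int))) = [] :=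
      List.filter_eq_nil_iff.2 (by intro j hj; simp [not_le.2 (hmemAr j hj)])
    rw [hsplitA, List.filter_append, h1, h2, List.append_nil]
  have hlibne : PySem.Str.isIn "Articolo" line = true → pvIdxs pvIsLib (pre ++ [line]) 0 ≠ [] := by
    intro hart
    have hq : ((pre.length : Int), line) ∈ PySem.List.enumerate lines 0 := by
      rw [PySem.List.mem_enumerate_iff]
      refine ⟨pre.length, hlenL, ?_⟩
      simp [hl, List.getElem_append_right]
    obtain ⟨-, r, hrmem, hrle, hrlib⟩ := hp _ hq hart
    have hrin : r.1 ∈ pvIdxs pvIsLib lines 0 := by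
      simp only [pvIdxs, List.mem_map]
      exact ⟨r, List.mem_filter.2 ⟨hrmem, by simpa [pvIsLib] using hrlib⟩, rfl⟩
    rw [hsplitL] at hrin
    rcases List.mem_append.1 hrin with h | h
    · exact fun he => by simp [he] at h
    · exact absurd (hmemLr _ h) (not_lt.2 hrle)
  have hproclen : pre.length < (List.map pvProc lines).length := by simpa using hlenL
  have hproc_t : (List.map pvProc lines)[pre.length]'(by simpa using hlenL) = pvProc line := by
    rw [List.getElem_map]
    simp [hl, List.getElem_append_right]
  have hlen1 : (((pre ++ [line]).length : Nat) : Int) = (pre.length : Int) + 1 := by simp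
  have hA0 := pvLastD_bounds (pvIdxs pvIsArt pre 0) (pre.length : Int) (Int.natCast_nonneg _) hmemA
  have hL0 := pvLastD_bounds (pvIdxs pvIsLib pre 0) (pre.length : Int) (Int.natCast_nonneg _) hmemL
  simp only [pvIsArt, pvIsLib] at hAeq hLeq
  by_cases hart : PySem.Str.isIn "Articolo" line = true
  · by_cases hlib : PySem.Str.isIn "LIBRO" line = true
    · rw [if_pos hart] at hAeq
      rw [if_pos hlib] at hLeq
      unfold pvStepA pvPhi
      simp only [hart, hlib, if_pos]
      simp only [Prod.mk.injEq]
      have hrow : [(some (PySem.Str.replace line "\n" "")).getD "",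
          PySem.Str.strip (PySem.Str.replace (PySem.Str.replace line "\n" "") "." ""),
          PySem.Str.strip (PySem.Str.replace ((PySem.List.pyGet? lines ((pre.length : Int) + 1)).getD "") "\n" ""),
          pvFmt2 ((pvIdxs pvIsLib pre 0).length + 1) ++ "." ++ pvFmt2 (0 + 1) ++ ".",
          pvFmt2 ((pvIdxs pvIsLib pre 0).length + 1) ++ "." ++ pvFmt2 (0 + 1) ++ ". " ++
            PySem.Str.strip (PySem.Str.strip (PySem.Str.replace (PySem.Str.replace line "\n" "") "." "")) ++ " - " ++
            PySem.Str.strip (PySem.Str.strip (PySem.Str.replace ((PySem.List.pyGet? lines ((pre.length : Int) + 1)).getD "") "\n" ""))]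
          = pvRow lines (pvIdxs pvIsArt lines 0) (pvIdxs pvIsLib lines 0) (pre.length : Int) := by
        simp only [pvRow]
        rw [hbefore, hLeq, pvGet_neg_one, List.getLast?_concat]
        rw [hcapfull ((some ((pre.length : Nat) : Int)).getD 0), hAeq]
        simp only [Option.getD_some]
        rw [List.filter_append,
            List.filter_eq_nil_iff.2 (fun j hj => by simpa using not_le.2 (hmemA j hj).2)]
        simp [hgt, pvRepl, pvStrip_idem, String.append_assoc]
      refine ⟨?_, by rw [hLeq]; simp, ?_, ?_, ?_, ?_⟩
      · rw [hAeq, List.map_append, List.map_cons, List.map_nil]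
        congr 1
        rw [← hrow]
      · rw [hAeq, hLeq, List.getLast?_concat]
        simp only [Option.getD_some]
        rw [List.filter_append,
            List.filter_eq_nil_iff.2 (fun j hj => by simpa using not_le.2 (hmemA j hj).2)]
        simp
      · rw [hAeq, List.foldl_append, List.foldl_cons, List.foldl_nil]
        simp [pvSegStep, pvSeg_snd]
      · rw [hAeq, hlen1, List.getLast?_concat]
        simp only [Option.getD_some]
        rw [pvSlice_extend _ _ _ (Int.natCast_nonneg _) le_rfl hproclen,
            pvSlice_empty _ _ (Int.natCast_nonneg _), hproc_t]
        simp [pvProc]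
      · rw [hLeq, List.getLast?_concat]
        simp [hgt, pvRepl]
    · rw [if_pos hart] at hAeq
      rw [if_neg hlib] at hLeq
      rw [List.append_nil] at hLeq
      have hne : pvIdxs pvIsLib pre 0 ≠ [] := by
        have := hlibne hart
        rwa [hLeq] at this
      obtain ⟨m, hm⟩ : ∃ m, (pvIdxs pvIsLib pre 0).getLast? = some m := by
        cases h : (pvIdxs pvIsLib pre 0).getLast? with
        | none => exact absurd (List.getLast?_eq_none_iff.1 h) hne
        | some m => exact ⟨m, rfl⟩
      have hmle : m ≤ ((pre.length : Nat) : Int) :=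
        le_of_lt (hmemL m (List.mem_of_getLast? hm)).2
      unfold pvStepA pvPhi
      simp only [hart, hlib, if_true, if_false, Bool.false_eq_true]
      simp only [Prod.mk.injEq]
      refine ⟨?_, by rw [hLeq], ?_, ?_, ?_, by rw [hLeq]⟩
      · rw [hAeq, List.map_append, List.map_cons, List.map_nil]
        congr 1
        simp only [pvRow]
        rw [hbefore, hLeq, pvGet_neg_one, hm]
        rw [hcapfull ((some m).getD 0), hAeq]
        simp only [Option.getD_some]
        rw [List.filter_append]
        simp [hgt, pvRepl, pvStrip_idem, String.append_assoc, List.filter_nil, hmle]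
      · rw [hAeq, hLeq, hm]
        simp only [Option.getD_some]
        rw [List.filter_append]
        simp [List.filter_nil, hmle]
      · rw [hAeq, List.foldl_append, List.foldl_cons, List.foldl_nil]
        simp [pvSegStep, pvSeg_snd]
      · rw [hAeq, hlen1, List.getLast?_concat]
        simp only [Option.getD_some]
        rw [pvSlice_extend _ _ _ (Int.natCast_nonneg _) le_rfl hproclen,
            pvSlice_empty _ _ (Int.natCast_nonneg _), hproc_t]
        simp [pvProc]
  · by_cases hlib : PySem.Str.isIn "LIBRO" line = true
    · rw [if_neg hart] at hAeq
      rw [List.append_nil] at hAeq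
      rw [if_pos hlib] at hLeq
      unfold pvStepA pvPhi
      simp only [hart, hlib, if_true, if_false, Bool.false_eq_true]
      simp only [Prod.mk.injEq]
      refine ⟨by rw [hAeq], by rw [hLeq]; simp, ?_, by rw [hAeq], ?_, ?_⟩
      · rw [hAeq, hLeq, List.getLast?_concat]
        simp only [Option.getD_some]
        rw [List.filter_eq_nil_iff.2
              (fun j hj => by simpa using not_le.2 (hmemA j hj).2)]
        simp
      · rw [hAeq, hlen1, pvSlice_extend _ _ _ hA0.1 hA0.2 hproclen, hproc_t]
        rfl
      · rw [hLeq, List.getLast?_concat]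
        simp [hgt, pvRepl]
    · rw [if_neg hart] at hAeq
      rw [List.append_nil] at hAeq
      rw [if_neg hlib] at hLeq
      rw [List.append_nil] at hLeq
      unfold pvStepA pvPhi
      simp only [hart, hlib, if_false, Bool.false_eq_true]
      simp only [Prod.mk.injEq]
      refine ⟨by rw [hAeq], by rw [hLeq], by rw [hAeq, hLeq], by rw [hAeq], ?_, by rw [hLeq]⟩
      rw [hAeq, hlen1, pvSlice_extend _ _ _ hA0.1 hA0.2 hproclen, hproc_t]
      rfl

theorem pvLoop (lines : List String) (hp : Pre_extract_articles lines) :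
    ∀ suf pre, lines = pre ++ suf →
      (PySem.List.enumerate suf (pre.length : Int)).foldl (pvStepA lines) (pvPhi lines pre)
        = pvPhi lines lines := by
  intro suf
  induction suf with
  | nil => intro pre h; simp at h; simp [h]
  | cons line rest ih =>
      intro pre h
      rw [PySem.List.enumerate_cons, List.foldl_cons, pvStep_phi lines pre rest line h hp]
      have h2 : lines = (pre ++ [line]) ++ rest := by simp [h]
      have := ih (pre ++ [line]) h2
      simpa [Int.add_comm] using this

-- ===== VERDICT (by name: the statement is the Claim_ definition above) =====
theorem extract_articles_spec : Claim_equal_extract_articles := by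
  intro lines _ hp
  unfold Spec_extract_articles extract_articles extract_articles_alt
  have h0 : pvPhi lines [] = ([], 0, 0, [], [], none) := by
    unfold pvPhi pvIdxs
    simp [PySem.List.slice_to]
  have := pvLoop lines hp lines [] rfl
  rw [h0] at this
  simp only [List.length_nil, Int.natCast_zero] at this
  rw [this]
  rfl
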